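-- pv_equiv track=rewrite | github.com/alist2000/UI_Wood | stableVersion4/line.py | edit_spacing
-- ===== SOURCE A (Python) =====
-- def edit_spacing(x, y):
--     x_list = [0]
--     y_list = [0]
--     for i in range(len(x)):
--         x_list.append(sum(x[:i + 1]))
--     for i in range(len(y)):
--         y_list.append(sum(y[:i + 1]))
--     return x_list, y_list
-- ===== SOURCE B (Python) =====
-- def edit_spacing(x, y):
--     x_list = [0]
--     acc = 0
--     for v in x:
--         acc += v
--         x_list.append(acc)
--     y_list = [0]
--     acc = 0
--     for v in y:
--         acc += v
--         y_list.append(acc)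
--     return x_list, y_list
-- ===== Notes on version B (the rewrite author's own statement) =====
-- stated objective: faster
-- what changed: Replaces the nested re-summation of each prefix slice sum(x[:i+1]) by a single sweep with one running accumulator per list.
import Mathlib
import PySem

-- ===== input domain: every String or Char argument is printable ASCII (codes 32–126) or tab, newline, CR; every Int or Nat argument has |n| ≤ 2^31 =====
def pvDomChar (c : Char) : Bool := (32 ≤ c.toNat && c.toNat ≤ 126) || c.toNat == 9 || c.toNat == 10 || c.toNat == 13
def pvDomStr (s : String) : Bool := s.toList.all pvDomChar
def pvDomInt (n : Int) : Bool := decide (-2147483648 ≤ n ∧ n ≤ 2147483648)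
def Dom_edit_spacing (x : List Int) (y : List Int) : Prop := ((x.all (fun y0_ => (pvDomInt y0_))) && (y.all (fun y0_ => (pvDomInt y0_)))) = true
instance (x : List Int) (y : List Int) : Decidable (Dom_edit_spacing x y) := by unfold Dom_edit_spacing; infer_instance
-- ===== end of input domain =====

-- B replaces the quadratic re-summation of every prefix slice by one running-accumulator sweep per list (asymptotically faster).

-- ===== PORT A =====
-- for i in range(len(x)): x_list.append(sum(x[:i+1]))
def pvPrefA (xs : List Int) : List Int :=
  (PySem.List.pyRange 0 (xs.length : Int) 1).foldl
    (fun acc i => acc ++ [(PySem.List.slice xs none (some (i + 1))).foldl (· + ·) 0]) [0]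

def edit_spacing (x : List Int) (y : List Int) : List Int × List Int :=
  (pvPrefA x, pvPrefA y)

-- ===== PORT B =====
-- acc = 0; for v in xs: acc += v; lst.append(acc)
def pvPrefB (xs : List Int) : List Int :=
  (xs.foldl (fun (st : List Int × Int) v =>
    let a := st.2 + v; (st.1 ++ [a], a)) ([0], 0)).1

def edit_spacing_alt (x : List Int) (y : List Int) : List Int × List Int :=
  (pvPrefB x, pvPrefB y)

-- ===== PRECONDITION & SPEC =====
def Spec_edit_spacing (x : List Int) (y : List Int) (out : List Int × List Int) : Prop := out = edit_spacing_alt x y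
instance (x : List Int) (y : List Int) (out : List Int × List Int) : Decidable (Spec_edit_spacing x y out) := by unfold Spec_edit_spacing; infer_instance

-- ===== CLAIM (what is proved, stated in full; the proofs are below) =====
def Claim_equal_edit_spacing : Prop := ∀ (x : List Int) (y : List Int), Dom_edit_spacing x y → Spec_edit_spacing x y (edit_spacing x y)

-- ===== LEMMAS AND PROOFS =====

lemma pv_foldl_add_eq (l : List Int) (s : Int) : l.foldl (· + ·) s = s + l.sum := by
  induction l generalizing s with
  | nil => simp
  | cons a t ih => simp [List.foldl_cons, ih, List.sum_cons]; ring

-- A's loop computes [0] ++ the map of prefix sums over indices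
lemma pvPrefA_eq (xs : List Int) :
    pvPrefA xs = [0] ++ (List.range xs.length).map (fun k => (xs.take (k + 1)).sum) := by
  unfold pvPrefA
  rw [PySem.List.foldl_append_singleton_eq_map, PySem.List.pyRange_one]
  simp only [Int.sub_zero, Int.toNat_natCast, List.map_map]
  congr 1
  refine List.map_congr_left ?_
  intro k _
  have h : (k : Int) + 1 = ((k + 1 : Nat) : Int) := by push_cast; ring
  simp only [Function.comp_apply, pv_foldl_add_eq, zero_add, h, PySem.List.slice_to_natCast]

-- B's sweep, generalized over the list built so far and the running total
lemma pvPrefB_inv (xs : List Int) (pre : List Int) (s : Int) :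
    (xs.foldl (fun (st : List Int × Int) v =>
      let a := st.2 + v; (st.1 ++ [a], a)) (pre, s)).1
    = pre ++ (List.range xs.length).map (fun k => s + (xs.take (k + 1)).sum) := by
  induction xs generalizing pre s with
  | nil => simp
  | cons v t ih =>
    simp only [List.foldl_cons, ih, List.length_cons, List.range_succ_eq_map,
      List.map_cons, List.map_map]
    simp [Function.comp, List.sum_cons]
    intro a _
    ring

lemma pvPrefB_eq (xs : List Int) :
    pvPrefB xs = [0] ++ (List.range xs.length).map (fun k => (xs.take (k + 1)).sum) := by
  unfold pvPrefB
  rw [pvPrefB_inv]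
  simp

lemma pvPref_eq (xs : List Int) : pvPrefA xs = pvPrefB xs := by
  rw [pvPrefA_eq, pvPrefB_eq]

-- ===== VERDICT (by name: the statement is the Claim_ definition above) =====
theorem edit_spacing_spec : Claim_equal_edit_spacing := by
  intro x y _
  unfold Spec_edit_spacing edit_spacing edit_spacing_alt
  rw [pvPref_eq, pvPref_eq]
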